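-- pv_equiv track=rewrite | github.com/alexandresilvapires/ChordNation | Source/music.py | get_needed_numbers_prog
-- ===== SOURCE A (Python) =====
-- def note_format(number: int) -> int:
--     """Given a number of a note > 11, sets the number to the correct format between [0,11]"""
--     return number % 12
--
-- def note_to_number(note) -> int:
--     """Converts a note to its key code"""
--
--     accidental = 0
--     value = 0
--
--     #Cycles every letter in the note name to accept names with multiple accidentals
--     for letter in note:
--         if(letter == '#'):
--             accidental += 1
--         elif(letter == 'b' or letter == 'f'):
--             accidental -= 1
--
--         elif(letter == 'C'):
--             value = 0
--         elif(letter == 'D'):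
--             value = 2
--         elif(letter == 'E'):
--             value = 4
--         elif(letter == 'F'):
--             value = 5
--         elif(letter == 'G'):
--             value = 7
--         elif(letter == 'A'):
--             value = 9
--         elif(letter == 'B'):
--             value = 11
--
--     #Adds the accidentals and makes the note octave independent
--     if(value+accidental > 11):
--         value = value+accidental+1
--     else:
--         value = value+accidental
--
--     return note_format(value)
--
-- def get_needed_numbers_prog(l: list) -> list:
--     """ Given a list of list of notes (a chord prog), returns a list with a list
--     for every number needed to be pressed for the chord to be correct"""
--     result = []
--
--     # Goes throught every note and makes it a number, simply
--     for chord in l: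
--         numbers = []
--         for note in chord:
--             numbers.append(note_to_number(note))
--         result.append(numbers)
--
--     return result
-- ===== SOURCE B (Python) =====
-- # B: no character loop of its own — accidentals via str.count, the deciding
-- # letter via str.rfind (the letter occurring last, i.e. at the greatest index, wins).
-- _LETTERS = (('C', 0), ('D', 2), ('E', 4), ('F', 5), ('G', 7), ('A', 9), ('B', 11))
--
--
-- def _note_number(note) -> int:
--     accidental = note.count('#') - note.count('b') - note.count('f')
--     pos, value = max(((note.rfind(letter), v) for letter, v in _LETTERS), default=(-1, 0))
--     if pos < 0:
--         value = 0
--     total = value + accidental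
--     return (total + 1) % 12 if total > 11 else total % 12
--
--
-- def get_needed_numbers_prog(l: list) -> list:
--     return [[_note_number(note) for note in chord] for chord in l]
-- ===== Notes on version B (the rewrite author's own statement) =====
-- stated objective: alternative
-- what changed: B has no character loop of its own: accidentals come from three str.count calls and the deciding note letter from str.rfind over the seven letters, taking the letter with the greatest last-occurrence index (max over (rfind, value) pairs), instead of A's single accumulating elif-chain loop over every character.
import Mathlib
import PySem

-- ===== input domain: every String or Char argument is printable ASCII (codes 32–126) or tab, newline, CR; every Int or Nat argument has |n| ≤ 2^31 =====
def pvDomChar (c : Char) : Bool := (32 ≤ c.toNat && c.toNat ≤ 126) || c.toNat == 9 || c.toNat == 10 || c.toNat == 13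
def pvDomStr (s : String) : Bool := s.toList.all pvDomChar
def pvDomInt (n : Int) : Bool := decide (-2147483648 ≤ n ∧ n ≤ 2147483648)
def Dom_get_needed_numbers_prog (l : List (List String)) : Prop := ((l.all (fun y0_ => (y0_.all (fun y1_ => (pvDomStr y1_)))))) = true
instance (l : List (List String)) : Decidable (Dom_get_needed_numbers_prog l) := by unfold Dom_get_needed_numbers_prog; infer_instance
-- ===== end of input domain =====

-- B drops A's per-character accumulating loop: accidentals come from three str.count calls
-- and the deciding letter from str.rfind (greatest last-occurrence index wins) — alternative.

-- ===== PORT A =====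
def note_format (number : Int) : Int := PySem.Int.mod number 12

def pvStepA (p : Int × Int) (letter : Char) : Int × Int :=
  if letter = '#' then (p.1 + 1, p.2)
  else if letter = 'b' ∨ letter = 'f' then (p.1 - 1, p.2)
  else if letter = 'C' then (p.1, 0)
  else if letter = 'D' then (p.1, 2)
  else if letter = 'E' then (p.1, 4)
  else if letter = 'F' then (p.1, 5)
  else if letter = 'G' then (p.1, 7)
  else if letter = 'A' then (p.1, 9)
  else if letter = 'B' then (p.1, 11)
  else p

def note_to_number (note : String) : Int :=
  let st := note.toList.foldl pvStepA (0, 0)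
  let value := if st.2 + st.1 > 11 then st.2 + st.1 + 1 else st.2 + st.1
  note_format value

def get_needed_numbers_prog (l : List (List String)) : List (List Int) :=
  l.foldl (fun result chord =>
    result ++ [chord.foldl (fun numbers note => numbers ++ [note_to_number note]) []]) []

-- ===== PORT B =====
def pvLetters : List (String × Int) := [("C", 0), ("D", 2), ("E", 4), ("F", 5), ("G", 7), ("A", 9), ("B", 11)]

-- Python's max on tuples: replace the accumulator only when the new pair is strictly
-- greater lexicographically (so the FIRST maximal pair is kept, as Python's max keeps it)
def pvPMax (acc x : Int × Int) : Int × Int :=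
  if acc.1 < x.1 ∨ (acc.1 = x.1 ∧ acc.2 < x.2) then x else acc

def pvNoteNumberAlt (note : String) : Int :=
  let accidental : Int := (PySem.Str.count note "#" : Int) - PySem.Str.count note "b" - PySem.Str.count note "f"
  let pairs := pvLetters.map (fun lv => (PySem.Str.rfind note lv.1, lv.2))
  let best : Int × Int := match pairs with
    | [] => ((-1 : Int), (0 : Int))
    | p :: rest => rest.foldl pvPMax p
  let value := if best.1 < 0 then (0 : Int) else best.2
  let total := value + accidental
  if total > 11 then PySem.Int.mod (total + 1) 12 else PySem.Int.mod total 12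

def get_needed_numbers_prog_alt (l : List (List String)) : List (List Int) :=
  l.map (fun chord => chord.map pvNoteNumberAlt)

-- ===== PRECONDITION & SPEC =====
def Spec_get_needed_numbers_prog (l : List (List String)) (out : List (List Int)) : Prop := out = get_needed_numbers_prog_alt l
instance (l : List (List String)) (out : List (List Int)) : Decidable (Spec_get_needed_numbers_prog l out) := by unfold Spec_get_needed_numbers_prog; infer_instance

-- ===== CLAIM (what is proved, stated in full; the proofs are below) =====
def Claim_equal_get_needed_numbers_prog : Prop := ∀ (l : List (List String)), Dom_get_needed_numbers_prog l → Spec_get_needed_numbers_prog l (get_needed_numbers_prog l)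

-- ===== LEMMAS AND PROOFS =====

-- A's value update, written as a lookup on the letter
def pvUpd (c : Char) (v : Int) : Int :=
  if c = 'C' then 0 else if c = 'D' then 2 else if c = 'E' then 4
  else if c = 'F' then 5 else if c = 'G' then 7 else if c = 'A' then 9
  else if c = 'B' then 11 else v

-- A's fold splits into (accidental sum, value fold)
lemma pvFoldA_eq (cs : List Char) (a v : Int) :
    cs.foldl pvStepA (a, v) =
      (a + (cs.map (fun c => if c = '#' then (1 : Int) else if c = 'b' ∨ c = 'f' then -1 else 0)).sum,
       cs.foldl (fun w c => pvUpd c w) v) := by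
  induction cs generalizing a v with
  | nil => simp
  | cons c rest ih =>
    simp only [List.foldl_cons, List.map_cons, List.sum_cons]
    rw [show pvStepA (a, v) c = ((pvStepA (a, v) c).1, (pvStepA (a, v) c).2) from rfl, ih]
    have h1 : (pvStepA (a, v) c).1
        = a + (if c = '#' then (1 : Int) else if c = 'b' ∨ c = 'f' then -1 else 0) := by
      simp only [pvStepA]
      split_ifs <;> simp_all
      omega
    have h2 : (pvStepA (a, v) c).2 = pvUpd c v := by
      simp only [pvStepA, pvUpd]
      split_ifs <;> simp_all
    rw [h1, h2, add_assoc]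

-- single-character str.count is the character count
lemma pvCountGoSingle (c : Char) (s : List Char) (fuel acc : Nat) (h : s.length ≤ fuel) :
    PySem.Chars.count.go [c] fuel s acc = acc + s.count c := by
  induction s generalizing fuel acc with
  | nil => cases fuel <;> rw [PySem.Chars.count.go] <;> simp
  | cons x t ih =>
    cases fuel with
    | zero => simp at h
    | succ fuel =>
      rw [PySem.Chars.count.go]
      simp only [List.length_cons] at h
      by_cases hx : c = x
      · subst hx
        have hpref : [c].isPrefixOf (c :: t) = true := by simp [List.isPrefixOf]
        rw [if_pos hpref]
        have hdrop : List.drop ([c].length) (c :: t) = t := by simp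
        rw [hdrop, ih fuel (acc + 1) (by omega)]
        simp
        omega
      · have hpref : [c].isPrefixOf (x :: t) = false := by
          simp [List.isPrefixOf]
          exact fun hcx => absurd hcx hx
        rw [if_neg (by simp [hpref])]
        rw [ih fuel acc (by omega)]
        simp [List.count_cons]
        intro hxc
        exact absurd hxc.symm hx

lemma pvCountSingle (cs : List Char) (c : Char) : PySem.Chars.count cs [c] = cs.count c := by
  simp [PySem.Chars.count]
  rw [pvCountGoSingle c cs cs.length 0 le_rfl]
  omega

-- accidental sum = #-count − b-count − f-count
lemma pvAccSum (cs : List Char) :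
    (cs.map (fun c => if c = '#' then (1 : Int) else if c = 'b' ∨ c = 'f' then -1 else 0)).sum
      = (cs.count '#' : Int) - cs.count 'b' - cs.count 'f' := by
  induction cs with
  | nil => simp
  | cons c rest ih =>
    simp only [List.map_cons, List.sum_cons, List.count_cons, ih]
    split_ifs with h1 h2 <;> simp_all <;> push_cast <;> omega

-- rfind.go bounds
lemma pvGoLe (s sub : List Char) (j : Nat) : PySem.Chars.rfind.go s sub j ≤ j ∧ -1 ≤ PySem.Chars.rfind.go s sub j := by
  induction j with
  | zero => rw [PySem.Chars.rfind.go]; split_ifs <;> simp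
  | succ j ih =>
    rw [PySem.Chars.rfind.go]
    split_ifs <;> push_cast <;> omega

-- heads agree, so prefix-of-a-singleton checks agree under an appended element
lemma pvPrefixAppend (L c : Char) (xs : List Char) (hx : xs ≠ []) :
    [L].isPrefixOf (xs ++ [c]) = [L].isPrefixOf xs := by
  cases xs with
  | nil => exact absurd rfl hx
  | cons y t => simp [List.isPrefixOf]

lemma pvGoAppend (cs : List Char) (c L : Char) (j : Nat) (hj : j < cs.length) :
    PySem.Chars.rfind.go (cs ++ [c]) [L] j = PySem.Chars.rfind.go cs [L] j := by
  induction j with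
  | zero =>
    rw [PySem.Chars.rfind.go]
    conv_rhs => rw [PySem.Chars.rfind.go]
    rw [pvPrefixAppend L c cs (by intro h; simp [h] at hj)]
  | succ j ih =>
    rw [PySem.Chars.rfind.go]
    conv_rhs => rw [PySem.Chars.rfind.go]
    rw [List.drop_append_of_le_length (by omega)]
    rw [pvPrefixAppend L c (cs.drop (j+1)) (by simp; omega)]
    rw [ih (by omega)]

lemma pvGoEmptyStep (s : List Char) (L : Char) (j : Nat) (hd : List.drop (j+1) s = []) :
    PySem.Chars.rfind.go s [L] (j+1) = PySem.Chars.rfind.go s [L] j := by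
  rw [PySem.Chars.rfind.go, hd]
  exact if_neg (by simp [List.isPrefixOf])

-- the crucial step: rfind after appending one character
lemma pvRfindAppend (cs : List Char) (c L : Char) :
    PySem.Chars.rfind (cs ++ [c]) [L] = if c = L then (cs.length : Int) else PySem.Chars.rfind cs [L] := by
  unfold PySem.Chars.rfind
  have hlen : (cs ++ [c]).length = cs.length + 1 := by simp
  rw [hlen, pvGoEmptyStep _ L cs.length (by simp)]
  cases cs with
  | nil =>
    have h0 : ∀ (s : List Char), PySem.Chars.rfind.go s [L] 0 = if [L].isPrefixOf s then 0 else -1 := by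
      intro s; rw [PySem.Chars.rfind.go]
    simp only [List.length_nil, List.nil_append, h0]
    by_cases hcL : L = c
    · subst hcL; simp [List.isPrefixOf]
    · have h1 : [L].isPrefixOf [c] = false := by
        simp [List.isPrefixOf]; exact fun h => hcL h
      have h2 : [L].isPrefixOf ([] : List Char) = false := rfl
      rw [h1, h2]
      simp only [Bool.false_eq_true, if_false]
      rw [if_neg (by intro h; exact hcL h.symm)]
  | cons x t =>
    have hR : PySem.Chars.rfind.go (x :: t) [L] ((x :: t).length)
        = PySem.Chars.rfind.go (x :: t) [L] t.length := by
      rw [show (x :: t).length = t.length + 1 from rfl]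
      exact pvGoEmptyStep _ L t.length (by simp)
    rw [hR]
    have hL : PySem.Chars.rfind.go ((x :: t) ++ [c]) [L] ((x :: t).length)
        = if [L].isPrefixOf [c] then ((x :: t).length : Int)
          else PySem.Chars.rfind.go ((x :: t) ++ [c]) [L] t.length := by
      rw [show (x :: t).length = t.length + 1 from rfl, PySem.Chars.rfind.go]
      have hd2 : List.drop (t.length + 1) ((x :: t) ++ [c]) = [c] := by
        rw [List.drop_append_of_le_length (by simp)]
        simp
      rw [hd2]
    rw [hL, pvGoAppend (x :: t) c L t.length (by simp)]
    by_cases hcL : L = c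
    · subst hcL
      rw [if_pos (by simp [List.isPrefixOf]), if_pos rfl]
    · have h1 : [L].isPrefixOf [c] = false := by
        simp [List.isPrefixOf]; exact fun h => hcL h
      rw [h1, if_neg (by simp), if_neg (fun h => hcL h.symm)]

lemma pvRfindLt (cs : List Char) (L : Char) : PySem.Chars.rfind cs [L] < cs.length := by
  unfold PySem.Chars.rfind
  cases cs with
  | nil =>
    have h0 : PySem.Chars.rfind.go [] [L] 0 = if [L].isPrefixOf ([] : List Char) then 0 else -1 := by
      rw [PySem.Chars.rfind.go]
    simp only [List.length_nil, h0]
    norm_num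
  | cons x t =>
    rw [show (x :: t).length = t.length + 1 from rfl, pvGoEmptyStep _ L t.length (by simp)]
    have h := pvGoLe (x :: t) [L] t.length
    push_cast
    omega

-- fold of pvPMax keeps the accumulator when everything is smaller
lemma pvFoldPMaxSmall (ps : List (Int × Int)) (acc : Int × Int) (h : ∀ p ∈ ps, p.1 < acc.1) :
    ps.foldl pvPMax acc = acc := by
  induction ps with
  | nil => rfl
  | cons p rest ih =>
    have hp : pvPMax acc p = acc := by
      have := h p (by simp)
      simp only [pvPMax]
      rw [if_neg (by omega)]
    simp only [List.foldl_cons, hp]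
    exact ih (fun q hq => h q (by simp [hq]))

lemma pvPMaxFst (a x : Int × Int) : (pvPMax a x).1 = max a.1 x.1 := by
  simp only [pvPMax]
  split_ifs with h <;> omega

lemma pvFoldPMaxFstLt (ps : List (Int × Int)) (acc : Int × Int) (n : Int)
    (ha : acc.1 < n) (h : ∀ p ∈ ps, p.1 < n) : (ps.foldl pvPMax acc).1 < n := by
  induction ps generalizing acc with
  | nil => exact ha
  | cons p rest ih =>
    simp only [List.foldl_cons]
    exact ih (pvPMax acc p) (by rw [pvPMaxFst]; exact max_lt ha (h p (by simp)))
      (fun q hq => h q (by simp [hq]))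

-- fold picks the unique pair with the strictly greatest first component
lemma pvFoldPMaxPick (pre post : List (Int × Int)) (acc w : Int × Int) (n : Int)
    (hw : w.1 = n) (ha : acc.1 < n) (hpre : ∀ p ∈ pre, p.1 < n) (hpost : ∀ p ∈ post, p.1 < n) :
    (pre ++ w :: post).foldl pvPMax acc = w := by
  rw [List.foldl_append, List.foldl_cons]
  have h1 : (pre.foldl pvPMax acc).1 < n := pvFoldPMaxFstLt pre acc n ha hpre
  have h2 : pvPMax (pre.foldl pvPMax acc) w = w := by
    simp only [pvPMax]
    rw [if_pos (by omega)]
  rw [h2]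
  exact pvFoldPMaxSmall post w (fun p hp => by rw [hw]; exact hpost p hp)

-- B's value computation over the character list
def pvBVal (cs : List Char) : Int :=
  let best := ([(PySem.Chars.rfind cs ['D'], (2 : Int)), (PySem.Chars.rfind cs ['E'], 4),
      (PySem.Chars.rfind cs ['F'], 5), (PySem.Chars.rfind cs ['G'], 7),
      (PySem.Chars.rfind cs ['A'], 9), (PySem.Chars.rfind cs ['B'], 11)]).foldl
      pvPMax (PySem.Chars.rfind cs ['C'], 0)
  if best.1 < 0 then 0 else best.2
lemma pvBValAppend (cs : List Char) (c : Char) : pvBVal (cs ++ [c]) = pvUpd c (pvBVal cs) := by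
  have hlt : ∀ L : Char, PySem.Chars.rfind cs [L] < (cs.length : Int) := fun L => pvRfindLt cs L
  have hn : (0 : Int) ≤ (cs.length : Int) := by positivity
  simp only [pvBVal, pvRfindAppend, pvUpd]
  by_cases hC : c = 'C'
  · subst hC
    simp only [Char.reduceEq, reduceIte]
    rw [pvFoldPMaxSmall _ _ (by intro p hp; fin_cases hp <;> exact hlt _)]
    rw [if_neg (by omega)]
  · rw [if_neg hC]
    by_cases hD : c = 'D'
    · subst hD
      simp only [Char.reduceEq, reduceIte]
      rw [show ([((cs.length : Int), (2:Int)), (PySem.Chars.rfind cs ['E'], 4),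
          (PySem.Chars.rfind cs ['F'], 5), (PySem.Chars.rfind cs ['G'], 7),
          (PySem.Chars.rfind cs ['A'], 9), (PySem.Chars.rfind cs ['B'], 11)])
          = [] ++ ((cs.length : Int), (2:Int)) :: [(PySem.Chars.rfind cs ['E'], 4),
          (PySem.Chars.rfind cs ['F'], 5), (PySem.Chars.rfind cs ['G'], 7),
          (PySem.Chars.rfind cs ['A'], 9), (PySem.Chars.rfind cs ['B'], 11)] from rfl]
      rw [pvFoldPMaxPick _ _ _ _ (cs.length : Int) rfl (hlt 'C')
        (by intro p hp; fin_cases hp) (by intro p hp; fin_cases hp <;> exact hlt _)]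
      rw [if_neg (by omega)]
    · rw [if_neg hD]
      by_cases hE : c = 'E'
      · subst hE
        simp only [Char.reduceEq, reduceIte]
        rw [show [(PySem.Chars.rfind cs ['D'], 2), ((cs.length : Int), (4:Int)), (PySem.Chars.rfind cs ['F'], 5), (PySem.Chars.rfind cs ['G'], 7), (PySem.Chars.rfind cs ['A'], 9), (PySem.Chars.rfind cs ['B'], 11)]
            = [(PySem.Chars.rfind cs ['D'], 2)] ++ ((cs.length : Int), (4:Int)) :: [(PySem.Chars.rfind cs ['F'], 5), (PySem.Chars.rfind cs ['G'], 7), (PySem.Chars.rfind cs ['A'], 9), (PySem.Chars.rfind cs ['B'], 11)] from rfl]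
        rw [pvFoldPMaxPick [(PySem.Chars.rfind cs ['D'], 2)] _ _ _ (cs.length : Int) rfl (hlt 'C')
          (by intro p hp; fin_cases hp <;> exact hlt _) (by intro p hp; fin_cases hp <;> exact hlt _)]
        rw [if_neg (by omega)]
      · rw [if_neg hE]
        by_cases hF : c = 'F'
        · subst hF
          simp only [Char.reduceEq, reduceIte]
          rw [show [(PySem.Chars.rfind cs ['D'], 2), (PySem.Chars.rfind cs ['E'], 4), ((cs.length : Int), (5:Int)), (PySem.Chars.rfind cs ['G'], 7), (PySem.Chars.rfind cs ['A'], 9), (PySem.Chars.rfind cs ['B'], 11)]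
              = [(PySem.Chars.rfind cs ['D'], 2), (PySem.Chars.rfind cs ['E'], 4)] ++ ((cs.length : Int), (5:Int)) :: [(PySem.Chars.rfind cs ['G'], 7), (PySem.Chars.rfind cs ['A'], 9), (PySem.Chars.rfind cs ['B'], 11)] from rfl]
          rw [pvFoldPMaxPick [(PySem.Chars.rfind cs ['D'], 2), (PySem.Chars.rfind cs ['E'], 4)] _ _ _
            (cs.length : Int) rfl (hlt 'C')
            (by intro p hp; fin_cases hp <;> exact hlt _) (by intro p hp; fin_cases hp <;> exact hlt _)]
          rw [if_neg (by omega)]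
        · rw [if_neg hF]
          by_cases hG : c = 'G'
          · subst hG
            simp only [Char.reduceEq, reduceIte]
            rw [show [(PySem.Chars.rfind cs ['D'], 2), (PySem.Chars.rfind cs ['E'], 4), (PySem.Chars.rfind cs ['F'], 5), ((cs.length : Int), (7:Int)), (PySem.Chars.rfind cs ['A'], 9), (PySem.Chars.rfind cs ['B'], 11)]
                = [(PySem.Chars.rfind cs ['D'], 2), (PySem.Chars.rfind cs ['E'], 4), (PySem.Chars.rfind cs ['F'], 5)] ++ ((cs.length : Int), (7:Int)) :: [(PySem.Chars.rfind cs ['A'], 9), (PySem.Chars.rfind cs ['B'], 11)] from rfl]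
            rw [pvFoldPMaxPick [(PySem.Chars.rfind cs ['D'], 2), (PySem.Chars.rfind cs ['E'], 4),
              (PySem.Chars.rfind cs ['F'], 5)] _ _ _ (cs.length : Int) rfl (hlt 'C')
              (by intro p hp; fin_cases hp <;> exact hlt _) (by intro p hp; fin_cases hp <;> exact hlt _)]
            rw [if_neg (by omega)]
          · rw [if_neg hG]
            by_cases hA : c = 'A'
            · subst hA
              simp only [Char.reduceEq, reduceIte]
              rw [show [(PySem.Chars.rfind cs ['D'], 2), (PySem.Chars.rfind cs ['E'], 4), (PySem.Chars.rfind cs ['F'], 5), (PySem.Chars.rfind cs ['G'], 7), ((cs.length : Int), (9:Int)), (PySem.Chars.rfind cs ['B'], 11)]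
                  = [(PySem.Chars.rfind cs ['D'], 2), (PySem.Chars.rfind cs ['E'], 4), (PySem.Chars.rfind cs ['F'], 5), (PySem.Chars.rfind cs ['G'], 7)] ++ ((cs.length : Int), (9:Int)) :: [(PySem.Chars.rfind cs ['B'], 11)] from rfl]
              rw [pvFoldPMaxPick [(PySem.Chars.rfind cs ['D'], 2), (PySem.Chars.rfind cs ['E'], 4),
                (PySem.Chars.rfind cs ['F'], 5), (PySem.Chars.rfind cs ['G'], 7)] _ _ _
                (cs.length : Int) rfl (hlt 'C')
                (by intro p hp; fin_cases hp <;> exact hlt _) (by intro p hp; fin_cases hp <;> exact hlt _)]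
              rw [if_neg (by omega)]
            · rw [if_neg hA]
              by_cases hB : c = 'B'
              · subst hB
                simp only [Char.reduceEq, reduceIte]
                rw [show [(PySem.Chars.rfind cs ['D'], 2), (PySem.Chars.rfind cs ['E'], 4), (PySem.Chars.rfind cs ['F'], 5), (PySem.Chars.rfind cs ['G'], 7), (PySem.Chars.rfind cs ['A'], 9), ((cs.length : Int), (11:Int))]
                    = [(PySem.Chars.rfind cs ['D'], 2), (PySem.Chars.rfind cs ['E'], 4), (PySem.Chars.rfind cs ['F'], 5), (PySem.Chars.rfind cs ['G'], 7), (PySem.Chars.rfind cs ['A'], 9)] ++ ((cs.length : Int), (11:Int)) :: [] from rfl]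
                rw [pvFoldPMaxPick [(PySem.Chars.rfind cs ['D'], 2), (PySem.Chars.rfind cs ['E'], 4),
                  (PySem.Chars.rfind cs ['F'], 5), (PySem.Chars.rfind cs ['G'], 7),
                  (PySem.Chars.rfind cs ['A'], 9)] [] _ _ (cs.length : Int) rfl (hlt 'C')
                  (by intro p hp; fin_cases hp <;> exact hlt _) (by intro p hp; fin_cases hp)]
                rw [if_neg (by omega)]
              · rw [if_neg hB]
                rw [if_neg hC, if_neg hD, if_neg hE, if_neg hF, if_neg hG, if_neg hA, if_neg hB]

lemma pvValEq (cs : List Char) : pvBVal cs = cs.foldl (fun w c => pvUpd c w) 0 := by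
  induction cs using List.reverseRecOn with
  | nil => decide
  | append_singleton cs c ih =>
    rw [pvBValAppend, List.foldl_append, List.foldl_cons, List.foldl_nil, ih]

lemma pvNote_eq (note : String) : note_to_number note = pvNoteNumberAlt note := by
  simp only [note_to_number, pvNoteNumberAlt, note_format, pvLetters, List.map_cons,
    List.map_nil, PySem.Str.count_eq, PySem.Str.rfind_eq, pvFoldA_eq]
  rw [pvAccSum]
  rw [show ("#" : String).toList = ['#'] from rfl, show ("b" : String).toList = ['b'] from rfl,
    show ("f" : String).toList = ['f'] from rfl, show ("C" : String).toList = ['C'] from rfl,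
    show ("D" : String).toList = ['D'] from rfl, show ("E" : String).toList = ['E'] from rfl,
    show ("F" : String).toList = ['F'] from rfl, show ("G" : String).toList = ['G'] from rfl,
    show ("A" : String).toList = ['A'] from rfl, show ("B" : String).toList = ['B'] from rfl]
  rw [pvCountSingle, pvCountSingle, pvCountSingle]
  have h := pvValEq note.toList
  simp only [pvBVal] at h
  rw [h]
  simp only [zero_add]
  split_ifs <;> rfl

lemma pvInner_eq (chord : List String) :
    chord.foldl (fun numbers note => numbers ++ [note_to_number note]) [] = chord.map pvNoteNumberAlt := by
  rw [PySem.List.foldl_append_singleton_eq_map]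
  exact List.map_congr_left (fun note _ => pvNote_eq note)

-- ===== VERDICT (by name: the statement is the Claim_ definition above) =====
theorem get_needed_numbers_prog_spec : Claim_equal_get_needed_numbers_prog := by
  intro l _
  unfold Spec_get_needed_numbers_prog get_needed_numbers_prog get_needed_numbers_prog_alt
  rw [PySem.List.foldl_append_singleton_eq_map]
  exact List.map_congr_left (fun chord _ => pvInner_eq chord)
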